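-- pv_equiv track=rewrite | github.com/GabrielFrizzo/competitive-programming | contests/ICPC2021/subregional/G.py | calc
-- ===== SOURCE A (Python) =====
-- def calc(a):
-- 	if not a:
-- 		return 1
-- 	if a in memo:
-- 		return memo
--
-- 	if a[0] == "B":
-- 		return calc(a[1:])
--
-- 	return calc(a[1:]) + calc(a[2:])
--
-- memo = {}
-- ===== SOURCE B (Python) =====
-- def calc(a):
--     # Linear DP over suffixes, right to left:
--     # dp1 = value of suffix starting at i+1, dp2 = at i+2.
--     dp1, dp2 = 1, 1
--     for c in reversed(a):
--         dp1, dp2 = (dp1 if c == "B" else dp1 + dp2), dp1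
--     return dp1
-- ===== Notes on version B (the rewrite author's own statement) =====
-- stated objective: faster
-- what changed: Replaced the exponential branching recursion over string suffixes (the memo dict is empty and never consulted effectively) with a right-to-left linear DP keeping only the last two suffix values; intended as faster (measured 6.22x at n=16; A times out at n=64 where B returns).
import Mathlib
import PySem

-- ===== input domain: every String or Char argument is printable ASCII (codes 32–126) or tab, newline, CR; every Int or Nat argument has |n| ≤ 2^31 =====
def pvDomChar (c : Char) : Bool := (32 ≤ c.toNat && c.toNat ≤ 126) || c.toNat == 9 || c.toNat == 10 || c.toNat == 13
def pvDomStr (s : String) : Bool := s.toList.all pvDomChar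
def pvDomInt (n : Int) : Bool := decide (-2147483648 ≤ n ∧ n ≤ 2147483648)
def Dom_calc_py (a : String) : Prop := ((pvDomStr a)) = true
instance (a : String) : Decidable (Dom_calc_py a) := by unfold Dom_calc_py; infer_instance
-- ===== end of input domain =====

-- B replaces A's exponential suffix recursion (whose memo dict is empty, so the
-- `a in memo` test is always False and memoisation never happens) with a linear
-- right-to-left DP carrying the last two suffix values. Intended as faster; measured
-- 6.22x at n=16, and A timed out at n=64 where B returned.

-- ===== PORT A =====
-- A's recursion over the string; a[1:]/a[2:] on nonnegative indices are exact as drops.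
-- The `if a in memo: return memo` branch is dead code: memo = {} is never written to,
-- so membership is always False; it is transcribed as a no-op test on the empty dict.
def calcA : List Char → Int
  | [] => 1
  | c :: rest =>
    if ((PySem.Dict.empty : PySem.Dict String Int).get? (String.ofList (c :: rest))).isSome then 0  -- unreachable: memo is empty
    else if c = 'B' then calcA rest
    else calcA rest + calcA (rest.drop 1)
termination_by l => l.length
decreasing_by
  all_goals simp

def calc_py (a : String) : Int := calcA a.toList

-- ===== PORT B =====
-- Source B: dp1, dp2 = 1, 1; for c in reversed(a): dp1, dp2 = (dp1 if c=='B' else dp1+dp2), dp1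
def calcStep (st : Int × Int) (c : Char) : Int × Int :=
  (if c = 'B' then st.1 else st.1 + st.2, st.1)

def calc_py_alt (a : String) : Int :=
  (a.toList.reverse.foldl calcStep (1, 1)).1

-- ===== PRECONDITION & SPEC =====
def Spec_calc_py (a : String) (out : Int) : Prop := out = calc_py_alt a
instance (a : String) (out : Int) : Decidable (Spec_calc_py a out) := by unfold Spec_calc_py; infer_instance

-- ===== CLAIM (what is proved, stated in full; the proofs are below) =====
def Claim_equal_calc_py : Prop := ∀ (a : String), Dom_calc_py a → Spec_calc_py a (calc_py a)

-- ===== LEMMAS AND PROOFS =====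

lemma calcA_cons (c : Char) (rest : List Char) :
    calcA (c :: rest) = if c = 'B' then calcA rest else calcA rest + calcA (rest.drop 1) := by
  rw [calcA]
  simp [PySem.Dict.empty, PySem.Dict.get?]

lemma foldl_calcStep (l : List Char) :
    l.reverse.foldl calcStep (1, 1) = (calcA l, calcA (l.drop 1)) := by
  induction l with
  | nil => simp [calcA]
  | cons c rest ih =>
    have : (c :: rest).reverse = rest.reverse ++ [c] := by simp
    rw [this, List.foldl_append, ih]
    simp [calcStep, calcA_cons]

-- ===== VERDICT =====
theorem calc_py_spec : Claim_equal_calc_py := by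
  intro a _
  unfold Spec_calc_py calc_py calc_py_alt
  rw [foldl_calcStep]
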